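-- pv_equiv track=rewrite | github.com/wyk18703232953/myResearch | codeComplex/data/filteredData/python/quadratic/python_quadratic_0349.py | generate_strings
-- ===== SOURCE A (Python) =====
-- def generate_strings(n):
--     if n <= 0:
--         return "", ""
--     base = [chr(ord('a') + (i % 26)) for i in range(n)]
--     s = "".join(base)
--     # Deterministic transformation of s to t:
--     # rotate left by k where k = n // 3, then reverse whole string
--     k = n // 3
--     if k > 0:
--         rotated = s[k:] + s[:k]
--
--     else:
--         rotated = s
--     t = rotated[::-1]
--     return s, t
-- ===== SOURCE B (Python) =====
-- def generate_strings(n):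
--     if n <= 0:
--         return "", ""
--     k = n // 3
--     s = "".join(chr(ord('a') + (i % 26)) for i in range(n))
--     # closed index map: t[j] = s[(k + n - 1 - j) % n], no slicing/reversing
--     t = "".join(chr(ord('a') + (((k + n - 1 - j) % n) % 26)) for j in range(n))
--     return s, t
-- ===== Notes on version B (the rewrite author's own statement) =====
-- stated objective: alternative
-- what changed: Replaces the slice-concat-reverse pipeline for t by a single comprehension using the closed index map t[j] = s[(k + n - 1 - j) % n].
import Mathlib
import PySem

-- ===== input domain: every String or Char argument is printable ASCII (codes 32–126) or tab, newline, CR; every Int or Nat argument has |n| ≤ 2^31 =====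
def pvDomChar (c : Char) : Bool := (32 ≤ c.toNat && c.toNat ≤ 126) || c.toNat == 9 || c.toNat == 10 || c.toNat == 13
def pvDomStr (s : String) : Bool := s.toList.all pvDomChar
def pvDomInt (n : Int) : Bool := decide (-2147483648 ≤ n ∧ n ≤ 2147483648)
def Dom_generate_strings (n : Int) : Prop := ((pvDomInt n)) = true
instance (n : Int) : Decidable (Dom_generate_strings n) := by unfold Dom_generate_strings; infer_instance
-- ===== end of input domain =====

-- B replaces A's slice-concat-reverse pipeline for t by one comprehension with
-- the closed index map t[j] = s[(k + n - 1 - j) % n]  (objective: alternative).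

-- chr(ord('a') + e) for 0 ≤ e < 26 is exactly Char.ofNat (97 + e) (ASCII; e = i % 26 is in [0,26))
def pvChr (i : Int) : Char := Char.ofNat (97 + (PySem.Int.mod i 26).toNat)

-- ===== PORT A =====
def generate_strings (n : Int) : String × String :=
  if n ≤ 0 then ("", "")
  else
    -- base is a list of one-char strings; "".join(base) is String.ofList of the chars
    let base : List Char := (PySem.List.pyRange 0 n 1).map pvChr
    let s := base
    let k := PySem.Int.floordiv n 3
    let rotated :=
      if k > 0 then
        PySem.List.slice s (some k) none ++ PySem.List.slice s none (some k)
      else s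
    -- rotated[::-1]; step -1 ≠ 0 so slice? is always some
    let t := (PySem.List.slice? rotated none none (-1)).getD []
    (String.ofList s, String.ofList t)

-- ===== PORT B =====
def generate_strings_alt (n : Int) : String × String :=
  if n ≤ 0 then ("", "")
  else
    let k := PySem.Int.floordiv n 3
    let s : List Char := (PySem.List.pyRange 0 n 1).map pvChr
    let t : List Char :=
      (PySem.List.pyRange 0 n 1).map (fun j => pvChr (PySem.Int.mod (k + n - 1 - j) n))
    (String.ofList s, String.ofList t)

-- ===== PRECONDITION & SPEC =====
def Spec_generate_strings (n : Int) (out : String × String) : Prop := out = generate_strings_alt n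
instance (n : Int) (out : String × String) : Decidable (Spec_generate_strings n out) := by unfold Spec_generate_strings; infer_instance

-- ===== CLAIM (what is proved, stated in full; the proofs are below) =====
def Claim_equal_generate_strings : Prop := ∀ (n : Int), Dom_generate_strings n → Spec_generate_strings n (generate_strings n)

-- ===== LEMMAS AND PROOFS =====

theorem pv_key (m kN : Nat) (hm : 0 < m) (hk : kN < m) :
    ((((PySem.List.pyRange 0 (m:Int) 1).map pvChr).drop kN ++
      ((PySem.List.pyRange 0 (m:Int) 1).map pvChr).take kN).reverse)
    = (PySem.List.pyRange 0 (m:Int) 1).map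
        (fun j => pvChr (PySem.Int.mod ((kN:Int) + (m:Int) - 1 - j) (m:Int))) := by
  rw [PySem.List.pyRange_zero_natCast, List.map_map, List.map_map]
  apply List.ext_getElem
  · simp [hk.le]
  · intro i h1 h2
    simp only [List.length_reverse, List.length_append, List.length_drop, List.length_take,
      List.length_map, List.length_range, Nat.min_eq_left hk.le] at h1 h2
    rw [List.getElem_reverse]
    simp only [List.length_append, List.length_drop, List.length_take,
      List.length_map, List.length_range, Nat.min_eq_left hk.le]
    by_cases hc : m - kN + kN - 1 - i < m - kN
    · rw [List.getElem_append_left (by simpa using hc)]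
      rw [List.getElem_drop, List.getElem_map, List.getElem_range, List.getElem_map,
        List.getElem_range]
      simp only [Function.comp]
      congr 1
      rw [PySem.Int.mod_eq_emod_of_pos (by exact_mod_cast hm)]
      rw [Int.emod_eq_of_lt (by omega) (by omega)]
      omega
    · rw [List.getElem_append_right (by simpa using hc)]
      rw [List.getElem_take, List.getElem_map, List.getElem_range, List.getElem_map,
        List.getElem_range]
      simp only [Function.comp, List.length_drop, List.length_map, List.length_range]
      congr 1
      rw [PySem.Int.mod_eq_emod_of_pos (by exact_mod_cast hm)]
      have hx : ((kN:Int) + (m:Int) - 1 - (i:Int)) = ((kN:Int) - 1 - (i:Int)) + (m:Int) * 1 := by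
        ring
      rw [hx, Int.add_mul_emod_self_left, Int.emod_eq_of_lt (by omega) (by omega)]
      omega

theorem pv_main (m : Nat) (hm : 0 < m) :
    generate_strings (m : Int) = generate_strings_alt (m : Int) := by
  have hpos : ¬ ((m:Int) ≤ 0) := by exact_mod_cast Nat.not_le.mpr hm
  have hk3 : PySem.Int.floordiv (m:Int) 3 = ((m/3 : Nat) : Int) := by
    exact_mod_cast PySem.Int.floordiv_natCast m 3
  have hklt : m / 3 < m := by omega
  simp only [generate_strings, generate_strings_alt, if_neg hpos, hk3]
  refine congrArg (Prod.mk _) (congrArg String.ofList ?_)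
  rw [PySem.List.slice?_none_none_neg_one, Option.getD_some]
  by_cases hkpos : ((m/3 : Nat) : Int) > 0
  · rw [if_pos hkpos, PySem.List.slice_from_natCast, PySem.List.slice_to_natCast]
    exact pv_key m (m/3) hm hklt
  · have h0 : m / 3 = 0 := by omega
    rw [if_neg hkpos]
    have := pv_key m 0 hm hm
    simp only [List.drop_zero, List.take_zero, List.append_nil] at this
    simpa [h0] using this

-- ===== VERDICT (by name: the statement is the Claim_ definition above) =====
theorem generate_strings_spec : Claim_equal_generate_strings := by
  intro n _
  unfold Spec_generate_strings
  by_cases h : n ≤ 0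
  · simp [generate_strings, generate_strings_alt, h]
  · have h' : 0 < n := lt_of_not_ge h
    obtain ⟨m, rfl⟩ := Int.eq_ofNat_of_zero_le (le_of_lt h')
    exact pv_main m (by exact_mod_cast h')
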